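-- pv_equiv track=rewrite | github.com/VIVERA83/Python_Lessons | Base_python/Урок №21 map filter zip.py | getTranscriptions
-- ===== SOURCE A (Python) =====
-- def getTranscriptions(st):
--     dict_Rus_eng = {'h': 'х', 'e': 'е',
--                     'l': 'л', 'o': 'о',
--                     'w': 'в', 'r': 'р',
--                     'd': 'д'
--                     }
--     # set(st) & set(dict_Rus_eng)  - возрвщает новое множество в котором есть элементы из обоих множеств, то есть будем работать только по тем буквам которые есть в словаре
--     for i in set(st) & set(dict_Rus_eng):  # проходим по общим элементам словаря(ключи) и строки
--         st = st.replace(i, dict_Rus_eng.get(i))  # подставляем в строку значение ключей словаря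
--     return st
-- ===== SOURCE B (Python) =====
-- def getTranscriptions(st):
--     out = []
--     for c in st:
--         if c == 'h':
--             out.append('х')
--         elif c == 'e':
--             out.append('е')
--         elif c == 'l':
--             out.append('л')
--         elif c == 'o':
--             out.append('о')
--         elif c == 'w':
--             out.append('в')
--         elif c == 'r':
--             out.append('р')
--         elif c == 'd':
--             out.append('д')
--         else:
--             out.append(c)
--     return ''.join(out)
-- ===== Notes on version B (the rewrite author's own statement) =====
-- stated objective: simpler
-- what changed: Replaced A's per-key whole-string str.replace rescans (driven by a set intersection) with a single left-to-right pass over the characters using an if/elif branch chain and an output accumulator joined at the end; no dict or set is used.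
import Mathlib
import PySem

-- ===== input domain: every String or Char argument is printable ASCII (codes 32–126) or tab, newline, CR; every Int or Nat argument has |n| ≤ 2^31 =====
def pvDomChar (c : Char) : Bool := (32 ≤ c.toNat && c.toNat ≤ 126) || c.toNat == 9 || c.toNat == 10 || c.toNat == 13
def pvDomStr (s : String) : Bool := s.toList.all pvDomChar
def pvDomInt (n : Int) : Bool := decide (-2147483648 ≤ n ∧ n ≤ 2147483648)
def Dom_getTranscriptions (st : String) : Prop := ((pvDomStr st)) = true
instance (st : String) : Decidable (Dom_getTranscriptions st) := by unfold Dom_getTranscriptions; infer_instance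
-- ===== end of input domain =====

-- B replaces A's per-key whole-string replace passes by one accumulator loop
-- over the characters with an if/elif branch chain (objective: simpler).


-- ===== PORT A =====
-- dict_Rus_eng: characters stand for Python's one-character strings
def pvRuDict : PySem.Dict Char Char :=
  PySem.Dict.ofList [('h','х'),('e','е'),('l','л'),('o','о'),('w','в'),('r','р'),('d','д')]

-- Python iterates 'set(st) & set(dict_Rus_eng)' in hash order; the replaces are
-- over pairwise-distinct keys whose replacement characters are never keys, so
-- they commute and the result does not depend on that order.
def getTranscriptions (st : String) : String :=
  String.ofList
    ((PySem.Set.inter (PySem.Set.ofList st.toList) (PySem.Set.ofList pvRuDict.keys)).foldl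
      (fun s i => PySem.Chars.replace s [i] [PySem.Dict.getD pvRuDict i i]) st.toList)

-- ===== PORT B =====
-- the if/elif chain of Source B, as the choice of the character appended
def pvBranch (c : Char) : Char :=
  if c = 'h' then 'х'
  else if c = 'e' then 'е'
  else if c = 'l' then 'л'
  else if c = 'o' then 'о'
  else if c = 'w' then 'в'
  else if c = 'r' then 'р'
  else if c = 'd' then 'д'
  else c

-- the for-loop of Source B: appends to 'out' (kept reversed), joined at the end
def pvLoopB : List Char → List Char → List Char
  | acc, [] => acc.reverse
  | acc, c :: rest => pvLoopB (pvBranch c :: acc) rest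

def getTranscriptions_alt (st : String) : String :=
  String.ofList (pvLoopB [] st.toList)

-- ===== PRECONDITION & SPEC =====
def Spec_getTranscriptions (st : String) (out : String) : Prop := out = getTranscriptions_alt st
instance (st : String) (out : String) : Decidable (Spec_getTranscriptions st out) := by unfold Spec_getTranscriptions; infer_instance

-- ===== CLAIM (what is proved, stated in full; the proofs are below) =====
def Claim_equal_getTranscriptions : Prop := ∀ (st : String), Dom_getTranscriptions st → Spec_getTranscriptions st (getTranscriptions st)

-- ===== LEMMAS AND PROOFS =====

-- the seven dictionary keys
def pvKeys : List Char := ['h','e','l','o','w','r','d']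

-- per-character effect of one pass of the Python loop's lookup
def pvVal (c : Char) : Char := PySem.Dict.getD pvRuDict c c

lemma pvRuDict_keys : pvRuDict.keys = pvKeys := by decide

lemma pvBranch_of_notin (x : Char) (hx : x ∉ pvKeys) : pvBranch x = x := by
  simp only [pvKeys, List.mem_cons, not_or] at hx
  obtain ⟨h1, h2, h3, h4, h5, h6, h7, -⟩ := hx
  simp [pvBranch, h1, h2, h3, h4, h5, h6, h7]

lemma pvVal_notin_keys (c : Char) (hc : c ∈ pvKeys) : pvVal c ∉ pvKeys := by
  fin_cases hc <;> decide

-- Python's s.replace(c, r) for one-character c, r is a character-wise map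
lemma go_single (c r : Char) :
    ∀ (fuel : Nat) (l acc : List Char), l.length ≤ fuel →
      PySem.Chars.replace.go [c] [r] fuel l acc
        = acc.reverse ++ l.map (fun x => if x = c then r else x) := by
  intro fuel
  induction fuel with
  | zero =>
    intro l acc h
    have : l = [] := List.eq_nil_of_length_eq_zero (Nat.le_zero.mp h)
    subst this; simp [PySem.Chars.replace.go]
  | succ n ih =>
    intro l acc h
    cases l with
    | nil => simp [PySem.Chars.replace.go]
    | cons x t =>
      simp only [PySem.Chars.replace.go]
      by_cases hx : x = c
      · subst hx
        have hpre : [x].isPrefixOf (x :: t) = true := by simp [List.isPrefixOf]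
        rw [if_pos hpre]
        have hdrop : List.drop [x].length (x :: t) = t := rfl
        rw [hdrop, ih t _ (by simpa using Nat.le_of_succ_le_succ h)]
        simp
      · have hpre : [c].isPrefixOf (x :: t) = false := by
          simp [List.isPrefixOf, Ne.symm hx]
        rw [if_neg (by simp [hpre])]
        rw [ih t _ (by simpa using Nat.le_of_succ_le_succ h)]
        simp [hx]

lemma replace_single (cs : List Char) (c r : Char) :
    PySem.Chars.replace cs [c] [r] = cs.map (fun x => if x = c then r else x) := by
  simp [PySem.Chars.replace, go_single c r cs.length cs [] (le_refl _)]

-- the A-side fold of maps is one map of the folded per-character function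
lemma foldl_replace_eq_map (v : Char → Char) (l cs : List Char) :
    l.foldl (fun s i => PySem.Chars.replace s [i] [v i]) cs
      = cs.map (fun x => l.foldl (fun y i => if y = i then v i else y) x) := by
  induction l generalizing cs with
  | nil => simp
  | cons c t ih =>
    rw [List.foldl_cons, replace_single, ih, List.map_map]
    rfl

lemma foldl_of_notin (l : List Char) (y : Char)
    (hl : ∀ c ∈ l, c ∈ pvKeys) (hy : y ∉ pvKeys) :
    l.foldl (fun y i => if y = i then pvVal i else y) y = y := by
  induction l with
  | nil => rfl
  | cons c t ih =>
    have hyc : y ≠ c := fun h => hy (h ▸ hl c (List.mem_cons_self))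
    simp only [List.foldl_cons, if_neg hyc]
    exact ih (fun d hd => hl d (List.mem_cons_of_mem _ hd))

lemma foldl_apply (l : List Char) (x : Char)
    (hnd : l.Nodup) (hl : ∀ c ∈ l, c ∈ pvKeys) :
    l.foldl (fun y i => if y = i then pvVal i else y) x
      = if x ∈ l then pvVal x else x := by
  induction l with
  | nil => simp
  | cons c t ih =>
    obtain ⟨hct, hndt⟩ := List.nodup_cons.mp hnd
    have htk : ∀ d ∈ t, d ∈ pvKeys := fun d hd => hl d (List.mem_cons_of_mem _ hd)
    by_cases hx : x = c
    · subst hx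
      have hstep : (if x = x then pvVal x else x) = pvVal x := if_pos rfl
      rw [List.foldl_cons, hstep,
        foldl_of_notin t (pvVal x) htk (pvVal_notin_keys x (hl x List.mem_cons_self))]
      simp
    · rw [List.foldl_cons, if_neg hx, ih hndt htk]
      simp [List.mem_cons, hx]

-- B's accumulator loop is the map of its branch chain
lemma pvLoopB_eq_map (l acc : List Char) :
    pvLoopB acc l = acc.reverse ++ l.map pvBranch := by
  induction l generalizing acc with
  | nil => simp [pvLoopB]
  | cons c t ih => simp [pvLoopB, ih]

-- ===== VERDICT (by name: the statement is the Claim_ definition above) =====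
theorem getTranscriptions_spec : Claim_equal_getTranscriptions := by
  intro st _
  unfold Spec_getTranscriptions getTranscriptions getTranscriptions_alt
  rw [pvLoopB_eq_map,
      show (fun s i => PySem.Chars.replace s [i] [PySem.Dict.getD pvRuDict i i])
        = (fun s i => PySem.Chars.replace s [i] [pvVal i]) from rfl,
      foldl_replace_eq_map]
  simp only [List.reverse_nil, List.nil_append]
  congr 1
  apply List.map_congr_left
  intro x hx
  set common : PySem.Set Char :=
    PySem.Set.inter (PySem.Set.ofList st.toList) (PySem.Set.ofList pvRuDict.keys) with hc
  have hmem : x ∈ common ↔ x ∈ pvKeys := by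
    rw [hc, PySem.Set.mem_inter, PySem.Set.mem_ofList, PySem.Set.mem_ofList, pvRuDict_keys]
    exact ⟨fun h => h.2, fun h => ⟨hx, h⟩⟩
  have hnd : common.Nodup := by
    rw [hc]; unfold PySem.Set.inter
    exact (PySem.Set.nodup_ofList _).filter _
  have hsub : ∀ c ∈ common, c ∈ pvKeys := fun c hcm => (by
    rw [hc, PySem.Set.mem_inter, PySem.Set.mem_ofList, pvRuDict_keys] at hcm
    exact hcm.2)
  rw [foldl_apply common x hnd hsub]
  by_cases hk : x ∈ pvKeys
  · rw [if_pos (hmem.mpr hk)]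
    fin_cases hk <;> rfl
  · rw [if_neg (fun h => hk (hmem.mp h))]
    exact (pvBranch_of_notin x hk).symm
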